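-- pv_equiv track=rewrite | github.com/wfletch/learning_code | python/spiral/spiral_alt.py | solve
-- ===== SOURCE A (Python) =====
-- def solve(A):
--     # Idea:
--     # Have two Indexes: Left and Right
--     # Add values to the locations of each index until the indeces overlap (or are the same)
--     # Each iteration lower the max depth the number can go to
--     # We can leverage the fact that the system is symettrical in the X and Y 'planes'
--     # Therefore, we can solve row [x] as well as [max_dim - x] at the same time
--     l = 0
--     r = (A*2) - 2
--     cur_dec = 0
--     max_dec = 0
--     res = [[-1 for x in range((A*2) -1)] for y in range((A*2) -1)]
--     cur_row = 0
--     while max_dec != A: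
--         while r - l >= 0:
--             cur_val = A - cur_dec
--             res[cur_row][l] = str(cur_val)
--             res[cur_row][r] = str(cur_val)
--             # Reflect around mid horizontal point
--             res[(2*A) - 2 - cur_row][l] = str(cur_val)
--             res[(2*A) - 2 - cur_row][r] = str(cur_val)
--             if cur_dec != max_dec:
--                 cur_dec +=1
--             r-=1
--             l+=1
--         cur_row+=1
--         max_dec+=1
--         cur_dec=0
--         l = 0
--         r = (A*2) -2
--     return (res)
-- ===== SOURCE B (Python) =====
-- def solve(A):
--     # Closed form: cell (i, j) holds A minus the Chebyshev distance to the nearest border.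
--     n = (A * 2) - 1
--     return [[str(A - min(i, j, n - 1 - i, n - 1 - j)) for j in range(n)] for i in range(n)]
-- ===== Notes on version B (the rewrite author's own statement) =====
-- stated objective: simpler
-- what changed: Replaces the two-pointer ring-filling loops with reflection and shrinking counters by a single nested comprehension computing each cell directly as str(A minus the Chebyshev distance to the nearest border).
-- outside the precondition, e.g. on solve(-1): A does not finish within the time limit, B returns []
import Mathlib
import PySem

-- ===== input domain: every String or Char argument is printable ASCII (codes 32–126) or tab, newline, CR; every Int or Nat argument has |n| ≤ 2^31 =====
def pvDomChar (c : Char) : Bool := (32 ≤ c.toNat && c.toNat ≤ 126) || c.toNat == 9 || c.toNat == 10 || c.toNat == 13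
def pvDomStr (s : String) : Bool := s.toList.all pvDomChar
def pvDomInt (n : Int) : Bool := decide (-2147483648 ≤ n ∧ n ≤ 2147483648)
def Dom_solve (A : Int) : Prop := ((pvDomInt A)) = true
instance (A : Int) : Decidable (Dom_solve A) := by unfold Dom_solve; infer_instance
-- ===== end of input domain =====

-- B replaces A's two-pointer ring-filling loops by a per-cell closed form
-- (A minus the Chebyshev distance to the nearest border); objective: simpler.

-- ===== PORT A =====
-- res[i][j] = v  (Python row mutation; indices A uses are nonnegative and in range)
def setCell (g : List (List String)) (i j : Int) (v : String) : List (List String) :=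
  g.modify i.toNat (fun row => row.set j.toNat v)

-- the inner 'while r - l >= 0' loop
def solveInner (A cur_row max_dec l r cur_dec : Int) (g : List (List String)) :
    List (List String) :=
  if _h : 0 ≤ r - l then
    let cur_val := PySem.Int.toStr (A - cur_dec)
    let g1 := setCell g cur_row l cur_val
    let g2 := setCell g1 cur_row r cur_val
    let g3 := setCell g2 (2*A - 2 - cur_row) l cur_val
    let g4 := setCell g3 (2*A - 2 - cur_row) r cur_val
    solveInner A cur_row max_dec (l+1) (r-1)
      (if cur_dec ≠ max_dec then cur_dec + 1 else cur_dec) g4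
  else g
termination_by (r + 1 - l).toNat
decreasing_by omega

-- the outer 'while max_dec != A' loop; the second guard makes the port total:
-- Python diverges there (only reachable when A < 0, outside Pre_solve)
def solveOuter (A cur_row max_dec : Int) (g : List (List String)) : List (List String) :=
  if _h : max_dec = A then g
  else if _h2 : A < max_dec then g
  else solveOuter A (cur_row + 1) (max_dec + 1)
        (solveInner A cur_row max_dec 0 (A*2 - 2) 0 g)
termination_by (A - max_dec).toNat
decreasing_by omega

-- Python fills res with int -1 placeholders; under Pre_solve every cell is
-- overwritten with a string, so the placeholder is ported as the string "-1".
def solve (A : Int) : List (List String) :=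
  solveOuter A 0 0
    ((PySem.List.pyRange 0 (A*2 - 1)).map (fun _ =>
      (PySem.List.pyRange 0 (A*2 - 1)).map (fun _ => "-1")))

-- ===== PORT B =====
def solve_alt (A : Int) : List (List String) :=
  let n := A*2 - 1
  (PySem.List.pyRange 0 n).map (fun i =>
    (PySem.List.pyRange 0 n).map (fun j =>
      PySem.Int.toStr (A - min (min i j) (min (n - 1 - i) (n - 1 - j)))))

-- ===== PRECONDITION & SPEC =====
-- Pre_ excludes A < 0, where Python's A diverges ('while max_dec != A' never terminates).
def Pre_solve (A : Int) : Prop := 0 ≤ A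
instance (A : Int) : Decidable (Pre_solve A) := by unfold Pre_solve; infer_instance
def pvWitness_solve : Int := (3)
def Spec_solve (A : Int) (out : List (List String)) : Prop := out = solve_alt A
instance (A : Int) (out : List (List String)) : Decidable (Spec_solve A out) := by unfold Spec_solve; infer_instance

-- ===== CLAIM (what is proved, stated in full; the proofs are below) =====
def Claim_equal_solve : Prop := ∀ (A : Int), Dom_solve A → Pre_solve A → Spec_solve A (solve A)

-- ===== LEMMAS AND PROOFS =====

-- cell read with defaults (the value at row i, column j)
def get2 (g : List (List String)) (i j : Nat) : String := (g.getD i []).getD j ""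

-- grid shape: N rows, each of length N
def Shape (g : List (List String)) (N : Nat) : Prop :=
  g.length = N ∧ ∀ k (h : k < g.length), g[k].length = N

lemma shape_setCell {g : List (List String)} {N : Nat} (hs : Shape g N)
    (i j : Int) (v : String) : Shape (setCell g i j v) N := by
  obtain ⟨h1, h2⟩ := hs
  refine ⟨by simpa [setCell] using h1, ?_⟩
  intro k hk
  simp only [setCell] at hk ⊢
  rw [List.length_modify] at hk
  have := h2 k hk
  rw [List.getElem_modify]
  split <;> simp [this]

lemma get2_setCell {g : List (List String)} {N : Nat} (hs : Shape g N)
    {i j : Int} (hi0 : 0 ≤ i) (hj0 : 0 ≤ j) (hi : i < (N : Int)) (hj : j < (N : Int))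
    (v : String) (i' j' : Nat) :
    get2 (setCell g i j v) i' j' =
      if (i' : Int) = i ∧ (j' : Int) = j then v else get2 g i' j' := by
  obtain ⟨h1, h2⟩ := hs
  have hiN : i.toNat < g.length := by omega
  simp only [get2, setCell, List.getD_eq_getElem?_getD, List.getElem?_modify]
  by_cases hii : i.toNat = i'
  · subst hii
    have hge : g[i.toNat]? = some g[i.toNat] := List.getElem?_eq_getElem hiN
    have hrow := h2 i.toNat hiN
    rw [hge]
    simp only [Option.map_eq_map, Option.map_some, Option.getD_some, ite_true]
    rw [List.getElem?_set]
    by_cases hjj : j.toNat = j'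
    · subst hjj
      rw [if_pos rfl, if_pos (show j.toNat < g[i.toNat].length by omega),
          if_pos (show ((i.toNat : Int) = i ∧ ((j.toNat : Int)) = j) from ⟨by omega, by omega⟩)]
      simp
    · rw [if_neg hjj, if_neg (by rintro ⟨hx, hy⟩; omega)]
  · simp only [if_neg hii]
    rw [if_neg (by rintro ⟨hx, hy⟩; omega)]
    simp only [Option.map_eq_map]
    cases hg : g[i']? <;> simp

lemma shape_solveInner {N : Nat} :
    ∀ (fuel : Nat) (A cur_row max_dec l r cur_dec : Int) (g : List (List String)),
      (r + 1 - l).toNat = fuel → Shape g N →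
      Shape (solveInner A cur_row max_dec l r cur_dec g) N := by
  intro fuel
  induction fuel using Nat.strong_induction_on with
  | _ fuel IH =>
    intro A cur_row max_dec l r cur_dec g hf hs
    rw [solveInner]
    split
    next hge =>
      exact IH ((r - 1) + 1 - (l + 1)).toNat (by omega) _ _ _ _ _ _ _ rfl
        (shape_setCell (shape_setCell (shape_setCell (shape_setCell hs _ _ _) _ _ _) _ _ _) _ _ _)
    next => exact hs

lemma inner_spec {A : Int} {N : Nat} (hN : (N : Int) = 2*A - 1) :
    ∀ (fuel : Nat) (l r cur_dec : Int) (cur_row max_dec : Int) (g : List (List String)),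
      (r + 1 - l).toNat = fuel →
      r = 2*A - 2 - l → 0 ≤ l → cur_dec = min l max_dec →
      0 ≤ cur_row → 2 * cur_row ≤ 2*A - 2 → 0 ≤ max_dec →
      Shape g N →
      ∀ i' j' : Nat,
        get2 (solveInner A cur_row max_dec l r cur_dec g) i' j' =
          if ((i' : Int) = cur_row ∨ (i' : Int) = 2*A - 2 - cur_row) ∧
             l ≤ (j' : Int) ∧ (j' : Int) ≤ r then
            PySem.Int.toStr (A - min (min (j' : Int) (2*A - 2 - (j' : Int))) max_dec)
          else get2 g i' j' := by
  intro fuel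
  induction fuel using Nat.strong_induction_on with
  | _ fuel IH =>
    intro l r cur_dec cur_row max_dec g hf hr hl hcd hcr0 hcr hmd hs i' j'
    have hN : (0:Int) ≤ (N:Int) := by positivity
    rw [solveInner]
    split
    next hge =>
      have hlr : l ≤ r := by omega
      have hs1 := shape_setCell hs cur_row l (PySem.Int.toStr (A - cur_dec))
      have hs2 := shape_setCell hs1 cur_row r (PySem.Int.toStr (A - cur_dec))
      have hs3 := shape_setCell hs2 (2*A - 2 - cur_row) l (PySem.Int.toStr (A - cur_dec))
      have hs4 := shape_setCell hs3 (2*A - 2 - cur_row) r (PySem.Int.toStr (A - cur_dec))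
      rw [IH ((r - 1) + 1 - (l + 1)).toNat (by omega) (l+1) (r-1) _ cur_row max_dec _ rfl
        (by omega) (by omega) (by split_ifs <;> omega) hcr0 hcr hmd hs4 i' j']
      rw [get2_setCell hs3 (by omega) (by omega) (by omega) (by omega) _ i' j']
      rw [get2_setCell hs2 (by omega) (by omega) (by omega) (by omega) _ i' j']
      rw [get2_setCell hs1 (by omega) (by omega) (by omega) (by omega) _ i' j']
      rw [get2_setCell hs (by omega) (by omega) (by omega) (by omega) _ i' j']
      split_ifs <;> first | rfl | (congr 1; omega)
    next hge =>
      rw [if_neg (by rintro ⟨hrow, hj1, hj2⟩; omega)]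

lemma outer_spec {A : Int} {N : Nat} (hN : (N : Int) = 2*A - 1) :
    ∀ (fuel : Nat) (k : Int) (g : List (List String)),
      (A - k).toNat = fuel → 0 ≤ k → k ≤ A → Shape g N →
      (∀ i' j' : Nat, i' < N → j' < N → min (i' : Int) (2*A - 2 - (i' : Int)) < k →
        get2 g i' j' = PySem.Int.toStr
          (A - min (min (i' : Int) (j' : Int))
                   (min (2*A - 2 - (i' : Int)) (2*A - 2 - (j' : Int))))) →
      (Shape (solveOuter A k k g) N ∧
       ∀ i' j' : Nat, i' < N → j' < N →
        get2 (solveOuter A k k g) i' j' = PySem.Int.toStr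
          (A - min (min (i' : Int) (j' : Int))
                   (min (2*A - 2 - (i' : Int)) (2*A - 2 - (j' : Int))))) := by
  intro fuel
  induction fuel using Nat.strong_induction_on with
  | _ fuel IH =>
    intro k g hf hk0 hkA hs H
    rw [solveOuter]
    split
    next heq =>
      refine ⟨hs, ?_⟩
      intro i' j' hi hj
      have hi' : (i' : Int) < (N : Int) := by exact_mod_cast hi
      have hj' : (j' : Int) < (N : Int) := by exact_mod_cast hj
      rw [H i' j' hi hj (by omega)]
    next hne =>
      split
      next hlt => exfalso; omega
      next hnlt =>
        have hkA' : k < A := by omega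
        have hs' := shape_solveInner ((A*2 - 2) + 1 - 0).toNat A k k 0 (A*2 - 2) 0 g rfl hs
        have hinner := inner_spec hN ((A*2 - 2) + 1 - 0).toNat 0 (A*2 - 2) 0 k k g rfl
          (by omega) (by omega) (by omega) hk0 (by omega) hk0 hs
        exact IH (A - (k+1)).toNat (by omega) (k+1) _ rfl (by omega) (by omega) hs'
          (by
            intro i' j' hi hj hmin
            have hi' : (i' : Int) < (N : Int) := by exact_mod_cast hi
            have hj' : (j' : Int) < (N : Int) := by exact_mod_cast hj
            rw [hinner i' j']
            split_ifs with hcond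
            · congr 1; omega
            · exact H i' j' hi hj (by omega))

lemma get2_eq {g : List (List String)} (i j : Nat) (h1 : i < g.length)
    (h2 : j < g[i].length) : get2 g i j = g[i][j] := by
  simp [get2, List.getD_eq_getElem?_getD, h1, h2]

-- ===== VERDICT (by name: the statement is the Claim_ definition above) =====
theorem solve_spec : Claim_equal_solve := by
  intro A _hdom hA
  show solve A = solve_alt A
  by_cases hA0 : A = 0
  · subst hA0
    rw [solve, solveOuter]
    simp [solve_alt]
  · have hA' : (0:Int) ≤ A := hA
    have hA1 : 1 ≤ A := by omega
    obtain ⟨N, hN⟩ : ∃ N : Nat, (N : Int) = 2*A - 1 := ⟨(2*A - 1).toNat, by omega⟩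
    have hshape : Shape ((PySem.List.pyRange 0 (A*2 - 1)).map (fun _ =>
        (PySem.List.pyRange 0 (A*2 - 1)).map (fun _ => "-1"))) N := by
      constructor
      · simp [PySem.List.length_pyRange_one]; omega
      · intro k hk
        rw [List.getElem_map]
        simp [PySem.List.length_pyRange_one]; omega
    obtain ⟨hsO, hO⟩ := outer_spec hN (A - 0).toNat 0 _ rfl le_rfl (by omega) hshape
      (by intro i' j' hi hj hmin
          have hi' : (i' : Int) < (N : Int) := by exact_mod_cast hi
          omega)
    have hslen : (solve A).length = N := by simp only [solve]; exact hsO.1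
    have haltlen : (solve_alt A).length = N := by
      simp [solve_alt, PySem.List.length_pyRange_one]; omega
    apply List.ext_getElem (by rw [haltlen, hslen])
    intro i hi1 hi2
    have hiN : i < N := by rwa [hslen] at hi1
    have hrowlen : (solve A)[i].length = N := by
      simp only [solve] at hi1 ⊢; exact hsO.2 i hi1
    have haltrowlen : (solve_alt A)[i].length = N := by
      simp [solve_alt, PySem.List.length_pyRange_one]; omega
    apply List.ext_getElem (by rw [hrowlen, haltrowlen])
    intro j hj1 hj2
    have hjN : j < N := by rwa [hrowlen] at hj1
    rw [← get2_eq i j (by rwa [hslen]) (by rwa [hrowlen])]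
    have hget : get2 (solve A) i j =
        PySem.Int.toStr (A - min (min (i : Int) (j : Int))
          (min (2*A - 2 - (i : Int)) (2*A - 2 - (j : Int)))) := by
      simp only [solve]; exact hO i j hiN hjN
    rw [hget]
    simp only [solve_alt, List.getElem_map, PySem.List.getElem_pyRange_one]
    congr 1
    omega
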